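-- pv_equiv track=rewrite | github.com/saicharanbhogi2001/leetcode_python | Q1816. Truncate Sentence.py | truncateSentence
-- ===== SOURCE A (Python) =====
-- def truncateSentence(s: str, k: int) -> str:
--     c=0
--     a=[]
--     for i in range(len(s)):
--         if s[i]==" ":
--             c+=1
--         if c==k:
--             break
--         else:
--             a.append(s[i])
--     return "".join(a)
-- ===== SOURCE B (Python) =====
-- def truncateSentence(s: str, k: int) -> str:
--     return " ".join(s.split(" ")[:k])
-- ===== Notes on version B (the rewrite author's own statement) =====
-- stated objective: idiomatic
-- what changed: Replaces A's Python-level char-by-char scan with a space counter and break by the word-level one-liner " ".join(s.split(" ")[:k]), which runs in C-level str operations.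
-- intended difference: For k = 0 on a sentence starting with a space, A returns the whole string (its counter hits 1 before the == 0 test can ever fire) while B returns the empty string, the correct join of the first 0 words. — e.g. on truncateSentence(" a", 0): A returns " a", B returns ""
-- outside the precondition, e.g. on truncateSentence('a b', -1): A returns 'a b', B returns 'a'
import Mathlib
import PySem

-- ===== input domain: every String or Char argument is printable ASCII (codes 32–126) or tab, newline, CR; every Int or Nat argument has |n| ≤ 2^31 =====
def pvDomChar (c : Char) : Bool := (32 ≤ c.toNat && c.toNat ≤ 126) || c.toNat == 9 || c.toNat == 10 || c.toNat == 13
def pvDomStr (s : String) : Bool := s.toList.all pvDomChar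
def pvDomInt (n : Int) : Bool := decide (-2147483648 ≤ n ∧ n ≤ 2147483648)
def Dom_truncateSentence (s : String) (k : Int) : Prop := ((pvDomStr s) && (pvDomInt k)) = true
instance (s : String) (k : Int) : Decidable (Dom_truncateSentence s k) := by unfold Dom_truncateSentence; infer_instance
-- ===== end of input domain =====

-- B replaces A's char-by-char counter scan by the idiomatic word-level " ".join(s.split(" ")[:k]);
-- equal on k ≥ 0 outside D_ (k = 0 with a leading space), where B's "" is the intended value.

-- ===== PORT A =====
-- the for-loop over range(len(s)) with counter c, accumulator a and break, as structural recursion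
def truncSentGoA (k : Int) : List Char → Int → List Char
  | [], _ => []
  | ch :: rest, c =>
      let c' := if ch = ' ' then c + 1 else c
      if c' = k then [] else ch :: truncSentGoA k rest c'

def truncateSentence (s : String) (k : Int) : String :=
  String.ofList (truncSentGoA k s.toList 0)

-- ===== PORT B =====
-- " ".join(s.split(" ")[:k])
def truncateSentence_alt (s : String) (k : Int) : String :=
  String.ofList (PySem.Chars.join [' ']
    (PySem.List.slice (PySem.Chars.splitOn s.toList [' ']) none (some k)))

-- ===== PRECONDITION & SPEC =====
-- Pre_ excludes negative k, outside the problem's contract (k ≥ 1): there A returns the whole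
-- string (its counter never reaches a negative value) while B returns a Python negative word
-- slice — both values are accidents of the respective mechanism, neither is specified.
def Pre_truncateSentence (s : String) (k : Int) : Prop := 0 ≤ k
instance (s : String) (k : Int) : Decidable (Pre_truncateSentence s k) := by
  unfold Pre_truncateSentence; infer_instance

def pvWitness_truncateSentence : String × Int := ("Hello how are you", 2)

-- For k = 0 on a sentence starting with a space, A returns the whole string (its counter hits 1
-- before the == 0 test can ever fire) while B returns "", the correct join of the first 0 words.
def D_truncateSentence (s : String) (k : Int) : Prop :=
  k = 0 ∧ s.toList.head? = some ' '
instance (s : String) (k : Int) : Decidable (D_truncateSentence s k) := by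
  unfold D_truncateSentence; infer_instance

def Spec_truncateSentence (s : String) (k : Int) (out : String) : Prop :=
  ¬ D_truncateSentence s k → out = truncateSentence_alt s k
instance (s : String) (k : Int) (out : String) : Decidable (Spec_truncateSentence s k out) := by
  unfold Spec_truncateSentence; infer_instance

def pvDiffWitness_truncateSentence : String × Int := (" a", 0)
def pvDiffWitnessOut_truncateSentence : String × String := (" a", "")

-- ===== CLAIM (what is proved, stated in full; the proofs are below) =====
def Claim_unchanged_truncateSentence : Prop := ∀ (s : String) (k : Int), Dom_truncateSentence s k → Pre_truncateSentence s k → Spec_truncateSentence s k (truncateSentence s k)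
def Claim_changed_truncateSentence : Prop := Dom_truncateSentence (pvDiffWitness_truncateSentence.1) (pvDiffWitness_truncateSentence.2) ∧ Pre_truncateSentence (pvDiffWitness_truncateSentence.1) (pvDiffWitness_truncateSentence.2) ∧ D_truncateSentence (pvDiffWitness_truncateSentence.1) (pvDiffWitness_truncateSentence.2) ∧ truncateSentence (pvDiffWitness_truncateSentence.1) (pvDiffWitness_truncateSentence.2) = pvDiffWitnessOut_truncateSentence.1 ∧ truncateSentence_alt (pvDiffWitness_truncateSentence.1) (pvDiffWitness_truncateSentence.2) = pvDiffWitnessOut_truncateSentence.2 ∧ pvDiffWitnessOut_truncateSentence.1 ≠ pvDiffWitnessOut_truncateSentence.2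
def Claim_exact_truncateSentence : Prop := ∀ (s : String) (k : Int), Dom_truncateSentence s k → Pre_truncateSentence s k → D_truncateSentence s k → truncateSentence s k ≠ truncateSentence_alt s k

-- ===== LEMMAS AND PROOFS =====

-- a simple structural split on ' ' (proof-only reference form of Chars.splitOn)
def truncSentSp : List Char → List (List Char)
  | [] => [[]]
  | c :: rest =>
      if c = ' ' then [] :: truncSentSp rest
      else
        match truncSentSp rest with
        | [] => [[c]]
        | p :: ps => (c :: p) :: ps

def truncSentMapFirst (f : List Char → List Char) : List (List Char) → List (List Char)
  | [] => []
  | p :: ps => f p :: ps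

theorem truncSentSp_ne_nil (l : List Char) : truncSentSp l ≠ [] := by
  cases l with
  | nil => simp [truncSentSp]
  | cons c rest =>
    simp only [truncSentSp]
    split_ifs
    · simp
    · cases h : truncSentSp rest <;> simp

theorem truncSentGo_eq (fuel : Nat) (l cur : List Char) (acc : List (List Char))
    (h : l.length ≤ fuel) :
    PySem.Chars.splitOn.go [' '] fuel l cur acc
      = acc.reverse ++ truncSentMapFirst (cur.reverse ++ ·) (truncSentSp l) := by
  induction fuel generalizing l cur acc with
  | zero =>
    have : l = [] := by cases l <;> simp_all
    subst this
    simp [PySem.Chars.splitOn.go, truncSentSp, truncSentMapFirst]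
  | succ n ih =>
    cases l with
    | nil => simp [PySem.Chars.splitOn.go, truncSentSp, truncSentMapFirst]
    | cons c rest =>
      by_cases hc : c = ' '
      · subst hc
        have hpre : [' '].isPrefixOf (' ' :: rest) = true := by simp [List.isPrefixOf]
        rw [show PySem.Chars.splitOn.go [' '] (n+1) (' ' :: rest) cur acc
              = PySem.Chars.splitOn.go [' '] n (List.drop [' '].length (' ' :: rest)) []
                  (cur.reverse :: acc) from by
          simp [PySem.Chars.splitOn.go, hpre]]
        rw [ih _ _ _ (by simpa using Nat.le_of_succ_le_succ h)]
        simp only [truncSentSp, if_true, truncSentMapFirst, List.reverse_cons,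
          List.append_assoc, List.singleton_append, List.nil_append, List.reverse_nil]
        cases h' : truncSentSp rest <;> simp [h']
      · have hpre : [' '].isPrefixOf (c :: rest) = false := by
          simp [List.isPrefixOf]; exact fun h' => absurd h'.symm hc
        rw [show PySem.Chars.splitOn.go [' '] (n+1) (c :: rest) cur acc
              = PySem.Chars.splitOn.go [' '] n rest (c :: cur) acc from by
          simp [PySem.Chars.splitOn.go, hpre]]
        rw [ih _ _ _ (by simpa using Nat.le_of_succ_le_succ h)]
        simp only [truncSentSp, if_neg hc]
        cases h' : truncSentSp rest with
        | nil => exact absurd h' (truncSentSp_ne_nil rest)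
        | cons p ps => simp [truncSentMapFirst]

theorem truncSentSplitOn_eq (l : List Char) :
    PySem.Chars.splitOn l [' '] = truncSentSp l := by
  rw [PySem.Chars.splitOn, truncSentGo_eq _ _ _ _ (by omega)]
  cases h : truncSentSp l with
  | nil => exact absurd h (truncSentSp_ne_nil l)
  | cons p ps => simp [truncSentMapFirst]

-- A's counter only matters through k - c
theorem truncSentGoA_shift (l : List Char) (k c : Int) :
    truncSentGoA k l c = truncSentGoA (k - c) l 0 := by
  induction l generalizing k c with
  | nil => simp [truncSentGoA]
  | cons ch rest ih =>
    by_cases hc : ch = ' '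
    · subst hc
      simp only [truncSentGoA, if_true, zero_add]
      by_cases hk : c + 1 = k
      · rw [if_pos hk, if_pos (by omega)]
      · rw [if_neg hk, if_neg (by omega : ¬ (1:Int) = k - c), ih k (c+1), ih (k - c) 1]
        congr 2
        omega
    · simp only [truncSentGoA, if_neg hc]
      by_cases hk : c = k
      · rw [if_pos hk, if_pos (by omega)]
      · rw [if_neg hk, if_neg (by omega : ¬ (0:Int) = k - c), ih k c, ih (k - c) 0]

-- once the counter is positive, k = 0 can never fire: A copies the rest of the string
theorem truncSentGoA_zero_pos (l : List Char) (c : Int) (hc : 1 ≤ c) :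
    truncSentGoA 0 l c = l := by
  induction l generalizing c with
  | nil => simp [truncSentGoA]
  | cons ch rest ih =>
    by_cases h : ch = ' '
    · simp only [truncSentGoA, if_pos h, if_neg (by omega : ¬ c + 1 = (0:Int))]
      rw [ih (c+1) (by omega)]
    · simp only [truncSentGoA, if_neg h, if_neg (by omega : ¬ c = (0:Int))]
      rw [ih c hc]

theorem truncSent_main (l : List Char) (k : Int) (hk : 1 ≤ k) :
    truncSentGoA k l 0 = PySem.Chars.join [' '] ((truncSentSp l).take k.toNat) := by
  induction l generalizing k with
  | nil =>
    have : (truncSentSp ([] : List Char)).take k.toNat = [[]] := by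
      have : k.toNat = k.toNat - 1 + 1 := by omega
      rw [truncSentSp, this]
      simp [List.take_succ_cons]
    simp [truncSentGoA, this, PySem.Chars.join, List.intercalate]
  | cons ch rest ih =>
    by_cases hc : ch = ' '
    · subst hc
      simp only [truncSentGoA, if_true, zero_add, truncSentSp]
      by_cases hk1 : (1 : Int) = k
      · rw [if_pos hk1]
        have : k.toNat = 1 := by omega
        simp [this, PySem.Chars.join, List.intercalate]
      · rw [if_neg hk1, truncSentGoA_shift rest k 1, ih (k - 1) (by omega)]
        have h2 : k.toNat = (k - 1).toNat + 1 := by omega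
        rw [h2, List.take_succ_cons]
        have hne : (truncSentSp rest).take ((k-1).toNat) ≠ [] := by
          cases hsp : truncSentSp rest with
          | nil => exact absurd hsp (truncSentSp_ne_nil rest)
          | cons p ps =>
            have : (k-1).toNat = (k-1).toNat - 1 + 1 := by omega
            rw [this]; simp
        cases htk : (truncSentSp rest).take ((k-1).toNat) with
        | nil => exact absurd htk hne
        | cons q qs => simp [PySem.Chars.join, List.intercalate]
    · simp only [truncSentGoA, if_neg hc, if_neg (by omega : ¬ (0:Int) = k)]
      rw [ih k hk]
      simp only [truncSentSp, if_neg hc]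
      cases hsp : truncSentSp rest with
      | nil => exact absurd hsp (truncSentSp_ne_nil rest)
      | cons p ps =>
        have h2 : k.toNat = (k.toNat - 1) + 1 := by omega
        rw [h2, List.take_succ_cons, List.take_succ_cons]
        cases htk : ps.take (k.toNat - 1) with
        | nil => simp [PySem.Chars.join, List.intercalate]
        | cons q qs => simp [PySem.Chars.join, List.intercalate]

-- ===== VERDICT (by name: the statement is the Claim_ definition above) =====
theorem truncateSentence_spec : Claim_unchanged_truncateSentence := by
  intro s k _ hpre hnd
  unfold Pre_truncateSentence at hpre
  unfold truncateSentence truncateSentence_alt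
  rw [PySem.List.slice_to _ hpre, truncSentSplitOn_eq]
  by_cases hk : 1 ≤ k
  · rw [truncSent_main s.toList k hk]
  · have hk0 : k = 0 := by omega
    subst hk0
    have hhd : s.toList.head? ≠ some ' ' := fun h => hnd ⟨rfl, h⟩
    cases hl : s.toList with
    | nil => simp [truncSentGoA, PySem.Chars.join, List.intercalate]
    | cons c rest =>
      have hc : c ≠ ' ' := by rw [hl] at hhd; simpa using hhd
      simp [truncSentGoA, hc, PySem.Chars.join, List.intercalate]

theorem truncateSentence_changed : Claim_changed_truncateSentence := by
  unfold Claim_changed_truncateSentence; decide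

theorem truncateSentence_tight : Claim_exact_truncateSentence := by
  intro s k _ _ hd
  obtain ⟨hk, hhd⟩ := hd
  subst hk
  cases hl : s.toList with
  | nil => rw [hl] at hhd; simp at hhd
  | cons c rest =>
    have hc : c = ' ' := by rw [hl] at hhd; simpa using hhd
    subst hc
    unfold truncateSentence truncateSentence_alt
    rw [PySem.List.slice_to _ le_rfl, hl]
    have hA : truncSentGoA 0 (' ' :: rest) 0 = ' ' :: rest := by
      simp only [truncSentGoA, if_true, zero_add, if_neg (by omega : ¬ (1:Int) = 0)]
      rw [truncSentGoA_zero_pos rest 1 le_rfl]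
    rw [hA]
    intro h
    have := congrArg String.toList h
    simp [PySem.Chars.join, List.intercalate] at this
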